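-- pv_equiv track=rewrite | github.com/md143rbh7f/competitions | topcoder/srm/609/PackingBallsDiv1.py | minPacks
-- ===== SOURCE A (Python) =====
-- def minPacks(k, a, b, c, d):
--     x = []
--     x.append(a)
--     for i in range(k - 1):
--         x.append((x[i] * b + c) % d + 1)
--     s = 0
--     for i in range(k):
--         s += x[i] // k
--         x[i] %= k
--     x.sort(reverse=True)
--     return s + min(i + x[i] for i in range(k))
-- ===== SOURCE B (Python) =====
-- def minPacks(k, a, b, c, d):
--     # Counting-sort variant: one pass builds the residue counts while summing
--     # the quotients; a descending sweep over residue values replaces the sort.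
--     s = 0
--     cnt = [0] * k
--     x = a
--     for i in range(k):
--         if i:
--             x = (x * b + c) % d + 1
--         s += x // k
--         cnt[x % k] += 1
--     best = None
--     idx = 0
--     for v in range(k - 1, -1, -1):
--         if cnt[v]:
--             cand = idx + v
--             if best is None or cand < best:
--                 best = cand
--             idx += cnt[v]
--     return s + best
-- ===== Notes on version B (the rewrite author's own statement) =====
-- stated objective: faster
-- what changed: B fuses sequence generation, quotient summing and residue counting into one pass and replaces A's comparison sort plus min-scan by a single descending counting sweep over the residue range [0,k), computing min(i+x[i]) from counts of values greater than each residue.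
import Mathlib
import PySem

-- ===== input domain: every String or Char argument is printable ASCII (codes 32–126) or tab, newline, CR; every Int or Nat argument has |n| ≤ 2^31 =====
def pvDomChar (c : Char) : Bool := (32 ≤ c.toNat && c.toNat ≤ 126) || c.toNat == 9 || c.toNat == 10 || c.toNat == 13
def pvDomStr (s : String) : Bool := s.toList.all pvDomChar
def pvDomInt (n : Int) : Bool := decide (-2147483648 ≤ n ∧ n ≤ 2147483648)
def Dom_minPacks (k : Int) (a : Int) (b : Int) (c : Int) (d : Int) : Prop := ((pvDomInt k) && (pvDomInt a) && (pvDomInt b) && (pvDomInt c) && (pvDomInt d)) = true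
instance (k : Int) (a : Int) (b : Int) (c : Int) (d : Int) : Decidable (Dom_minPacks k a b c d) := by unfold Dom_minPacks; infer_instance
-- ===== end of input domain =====

-- B replaces A's comparison sort of the k residues by a counting sweep over the value
-- range [0, k): same return value, O(k) instead of O(k log k).

-- ===== PORT A =====
-- literal transliteration of A; pyGetD/pySetD defaults are never used (indices are in
-- range), and the empty-min case (k ≤ 0, Python ValueError) is excluded by Pre_.
def minPacks (k : Int) (a : Int) (b : Int) (c : Int) (d : Int) : Int :=
  let x : List Int := []
  let x := x ++ [a]
  let x := (PySem.List.pyRange 0 (k - 1) 1).foldl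
      (fun x i => x ++ [PySem.Int.mod (PySem.List.pyGetD x i 0 * b + c) d + 1]) x
  let sx := (PySem.List.pyRange 0 k 1).foldl
      (fun (sx : Int × List Int) i =>
        (sx.1 + PySem.Int.floordiv (PySem.List.pyGetD sx.2 i 0) k,
         PySem.List.pySetD sx.2 i (PySem.Int.mod (PySem.List.pyGetD sx.2 i 0) k)))
      (0, x)
  let x := PySem.List.sorted sx.2 (fun t => t) true
  sx.1 + (PySem.List.min? ((PySem.List.pyRange 0 k 1).map
      (fun i => i + PySem.List.pyGetD x i 0)) (fun t => t)).getD 0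

-- ===== PORT B =====
-- literal transliteration of Source B; the `.getD 0` renders `s + best` where best = None
-- (k ≤ 0, a Python TypeError) — excluded by Pre_.
def minPacks_alt (k : Int) (a : Int) (b : Int) (c : Int) (d : Int) : Int :=
  let st := (PySem.List.pyRange 0 k 1).foldl
      (fun (st : Int × Int × List Int) i =>
        let x := if i ≠ 0 then PySem.Int.mod (st.2.1 * b + c) d + 1 else st.2.1
        (st.1 + PySem.Int.floordiv x k, x,
         PySem.List.pySetD st.2.2 (PySem.Int.mod x k)
           (PySem.List.pyGetD st.2.2 (PySem.Int.mod x k) 0 + 1)))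
      (0, a, List.replicate k.toNat 0)
  let bi := (PySem.List.pyRange (k - 1) (-1) (-1)).foldl
      (fun (bi : Option Int × Int) v =>
        if PySem.List.pyGetD st.2.2 v 0 ≠ 0 then
          let cand := bi.2 + v
          ((if bi.1.isNone || cand < bi.1.getD 0 then some cand else bi.1),
           bi.2 + PySem.List.pyGetD st.2.2 v 0)
        else bi)
      (none, 0)
  st.1 + (bi.1).getD 0

-- ===== PRECONDITION & SPEC =====
-- Pre_ excludes exactly the inputs where the Python A raises: k ≤ 0 (min() of an empty
-- generator, ValueError) and k ≥ 2 with d = 0 (ZeroDivisionError in the sequence step).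
def Pre_minPacks (k : Int) (a : Int) (b : Int) (c : Int) (d : Int) : Prop :=
  1 ≤ k ∧ (k = 1 ∨ d ≠ 0)
instance (k : Int) (a : Int) (b : Int) (c : Int) (d : Int) : Decidable (Pre_minPacks k a b c d) := by unfold Pre_minPacks; infer_instance

def pvWitness_minPacks : Int × Int × Int × Int × Int := (5, 13, 7, 3, 11)

def Spec_minPacks (k : Int) (a : Int) (b : Int) (c : Int) (d : Int) (out : Int) : Prop := out = minPacks_alt k a b c d
instance (k : Int) (a : Int) (b : Int) (c : Int) (d : Int) (out : Int) : Decidable (Spec_minPacks k a b c d out) := by unfold Spec_minPacks; infer_instance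

-- ===== CLAIM (what is proved, stated in full; the proofs are below) =====
def Claim_equal_minPacks : Prop := ∀ (k : Int) (a : Int) (b : Int) (c : Int) (d : Int), Dom_minPacks k a b c d → Pre_minPacks k a b c d → Spec_minPacks k a b c d (minPacks k a b c d)

-- ===== LEMMAS AND PROOFS =====

def pvGen (a b c d : Int) : Nat → Int
  | 0 => a
  | i + 1 => PySem.Int.mod (pvGen a b c d i * b + c) d + 1

theorem pvA1 (a b c d : Int) (n : Nat) :
    (PySem.List.pyRange 0 (n : Int) 1).foldl
      (fun x i => x ++ [PySem.Int.mod (PySem.List.pyGetD x i 0 * b + c) d + 1]) [a]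
      = (List.range (n + 1)).map (pvGen a b c d) := by
  induction n with
  | zero =>
    rw [show ((0:Nat) : Int) = 0 by norm_num, PySem.List.pyRange_one_eq_nil (le_refl 0)]
    simp [pvGen, List.range_succ]
  | succ n ih =>
    rw [show ((n + 1 : Nat) : Int) = (n : Int) + 1 by push_cast; ring]
    rw [PySem.List.pyRange_one_succ_right (by positivity)]
    rw [List.foldl_append, ih]
    simp only [List.foldl_cons, List.foldl_nil]
    rw [PySem.List.pyGetD_natCast, PySem.List.getD_map_range _ _ _ _ (by omega)]
    rw [List.range_succ (n := n + 1), List.map_append]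
    simp [pvGen]

theorem pvGetD_append_cons (pre xs : List Int) (x d : Int) :
    PySem.List.pyGetD (pre ++ x :: xs) (pre.length : Int) d = x := by
  simp [PySem.List.pyGetD_natCast, List.getD_eq_getElem?_getD]

theorem pvSetD_append_cons (pre xs : List Int) (x v : Int) :
    PySem.List.pySetD (pre ++ x :: xs) (pre.length : Int) v = pre ++ v :: xs := by
  simp [PySem.List.pySetD_natCast]

theorem pvA2 (k : Int) (xs : List Int) : ∀ (pre : List Int) (s0 : Int),
    (PySem.List.pyRange (pre.length : Int) ((pre.length : Int) + (xs.length : Int)) 1).foldl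
      (fun (sx : Int × List Int) i =>
        (sx.1 + PySem.Int.floordiv (PySem.List.pyGetD sx.2 i 0) k,
         PySem.List.pySetD sx.2 i (PySem.Int.mod (PySem.List.pyGetD sx.2 i 0) k)))
      (s0, pre ++ xs)
    = (s0 + (xs.map (fun t => PySem.Int.floordiv t k)).sum,
       pre ++ xs.map (fun t => PySem.Int.mod t k)) := by
  induction xs with
  | nil =>
    intro pre s0
    rw [show ((pre.length : Int) + (([] : List Int).length : Int)) = (pre.length : Int) by simp]
    rw [PySem.List.pyRange_one_eq_nil (le_refl _)]
    simp
  | cons x xs ih =>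
    intro pre s0
    rw [PySem.List.pyRange_one_cons (by simp only [List.length_cons]; push_cast; omega)]
    simp only [List.foldl_cons]
    rw [pvGetD_append_cons, pvSetD_append_cons]
    have h1 : pre ++ PySem.Int.mod x k :: xs = (pre ++ [PySem.Int.mod x k]) ++ xs := by
      simp
    have h2 : ((pre.length : Int) + 1) = (((pre ++ [PySem.Int.mod x k]).length : Int)) := by
      simp
    have h3 : ((pre.length : Int) + ((x :: xs).length : Int))
        = ((pre ++ [PySem.Int.mod x k]).length : Int) + (xs.length : Int) := by
      simp; push_cast; ring
    rw [h1, h2, h3, ih]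
    simp [add_assoc]

def pvCounts (M : List Int) (n : Nat) : List Int :=
  (List.range n).map (fun (j : Nat) => (M.countP (fun t => t = (j : Int)) : Int))

theorem pvCounts_len (M : List Int) (n : Nat) : (pvCounts M n).length = n := by
  simp [pvCounts]

theorem pvCounts_getElem (M : List Int) (n : Nat) (j : Nat) (h : j < n) :
    (pvCounts M n)[j]'(by rw [pvCounts_len]; exact h) = (M.countP (fun t => t = (j : Int)) : Int) := by
  simp only [pvCounts, List.getElem_map, List.getElem_range]

theorem pvCounts_get (M : List Int) (n : Nat) (v : Int) (h0 : 0 ≤ v) (hn : v < (n : Int)) :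
    PySem.List.pyGetD (pvCounts M n) v 0 = (M.countP (fun t => t = v) : Int) := by
  rw [PySem.List.pyGetD_eq_getElem _ _ h0 (by rw [pvCounts_len]; exact_mod_cast hn)]
  rw [pvCounts_getElem M n v.toNat (by omega)]
  rw [Int.toNat_of_nonneg h0]

theorem pvCounts_bump (M : List Int) (n : Nat) (v : Int) (h0 : 0 ≤ v) (hn : v < (n : Int)) :
    PySem.List.pySetD (pvCounts M n) v (PySem.List.pyGetD (pvCounts M n) v 0 + 1)
      = pvCounts (M ++ [v]) n := by
  rw [pvCounts_get M n v h0 hn, PySem.List.pySetD_of_nonneg _ _ h0]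
  apply List.ext_getElem
  · simp [pvCounts_len]
  · intro j hj hj'
    have hjn : j < n := by rw [pvCounts_len] at hj'; exact hj'
    rw [List.getElem_set, pvCounts_getElem _ _ j hjn]
    rw [pvCounts_getElem (M ++ [v]) n j hjn, List.countP_append, List.countP_singleton]
    by_cases hv : v = (j : Int)
    · rw [if_pos (by omega : v.toNat = j)]
      simp [hv]
    · rw [if_neg (by omega : ¬ v.toNat = j)]
      simp [hv]

theorem pvB1 (k a b c d : Int) (n : Nat) (hn : k = (n : Int)) (h1 : 1 ≤ n) :
    ∀ (m : Nat), 1 ≤ m → m ≤ n →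
    (PySem.List.pyRange 0 (m : Int) 1).foldl
      (fun (st : Int × Int × List Int) i =>
        (st.1 + PySem.Int.floordiv (if i ≠ 0 then PySem.Int.mod (st.2.1 * b + c) d + 1 else st.2.1) k,
         (if i ≠ 0 then PySem.Int.mod (st.2.1 * b + c) d + 1 else st.2.1),
         PySem.List.pySetD st.2.2 (PySem.Int.mod (if i ≠ 0 then PySem.Int.mod (st.2.1 * b + c) d + 1 else st.2.1) k)
           (PySem.List.pyGetD st.2.2 (PySem.Int.mod (if i ≠ 0 then PySem.Int.mod (st.2.1 * b + c) d + 1 else st.2.1) k) 0 + 1)))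
      (0, a, List.replicate k.toNat 0)
    = (((List.range m).map (fun i => PySem.Int.floordiv (pvGen a b c d i) k)).sum,
       pvGen a b c d (m - 1),
       pvCounts ((List.range m).map (fun i => PySem.Int.mod (pvGen a b c d i) k)) n) := by
  have hk : (0:Int) < k := by omega
  have hrepl : List.replicate k.toNat 0 = pvCounts [] n := by
    apply List.ext_getElem
    · simp [pvCounts]; omega
    · intro j hj hj'
      simp [pvCounts]
  have hmod : ∀ t : Int, 0 ≤ PySem.Int.mod t k ∧ PySem.Int.mod t k < (n:Int) := by
    intro t
    refine ⟨PySem.Int.mod_nonneg t hk, ?_⟩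
    have := PySem.Int.mod_lt t hk
    omega
  intro m
  induction m with
  | zero => omega
  | succ m ih =>
    intro _ hmn
    by_cases hm1 : m = 0
    · subst hm1
      rw [show ((1:Nat):Int) = 0 + 1 by norm_num, PySem.List.pyRange_one_succ_right (le_refl 0),
        PySem.List.pyRange_one_eq_nil (le_refl 0)]
      simp only [List.nil_append, List.foldl_cons, List.foldl_nil]
      simp only [ne_eq, not_true_eq_false, if_neg, ite_self, reduceIte]
      rw [hrepl, pvCounts_bump _ _ _ (hmod a).1 (hmod a).2]
      simp [pvGen, List.range_succ]
    · have hm : 1 ≤ m := by omega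
      rw [show ((m+1 : Nat):Int) = (m:Int) + 1 by push_cast; ring,
        PySem.List.pyRange_one_succ_right (by positivity), List.foldl_append,
        ih hm (by omega)]
      simp only [List.foldl_cons, List.foldl_nil]
      have hne : ((m:Int)) ≠ 0 := by omega
      simp only [ne_eq, hne, not_false_eq_true, if_pos, reduceIte]
      have hgen : PySem.Int.mod (pvGen a b c d (m - 1) * b + c) d + 1 = pvGen a b c d m := by
        conv_rhs => rw [show m = (m - 1) + 1 by omega]
        rfl
      rw [hgen, pvCounts_bump _ _ _ (hmod (pvGen a b c d m)).1 (hmod (pvGen a b c d m)).2]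
      rw [List.range_succ, List.map_append, List.map_append, List.sum_append]
      simp [add_assoc]

def pvG (L : List Int) (v : Int) : Int := (L.countP (fun t => v < t) : Int)
def pvInv (L : List Int) (w : Int) (best : Option Int) : Prop :=
  (best = none → ∀ j ∈ L, j < w) ∧
  ∀ m, best = some m →
    (∃ j ∈ L, w ≤ j ∧ m = pvG L j + j) ∧ (∀ j ∈ L, w ≤ j → m ≤ pvG L j + j)

theorem pvG_step (L : List Int) (w : Int) :
    pvG L (w - 1) = pvG L w + (L.countP (fun t => t = w) : Int) := by
  unfold pvG
  induction L with
  | nil => simp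
  | cons h tl ih =>
    rw [List.countP_cons, List.countP_cons, List.countP_cons]
    push_cast
    split_ifs with h1 h2 h3 <;> simp_all only [decide_eq_true_eq] <;> omega

theorem pvInv_step_absent (L : List Int) (w : Int) (best : Option Int)
    (h : pvInv L (w + 1) best) (habs : w ∉ L) : pvInv L w best := by
  obtain ⟨hn, hs⟩ := h
  constructor
  · intro he j hj
    have := hn he j hj
    have : j ≠ w := fun hjw => habs (hjw ▸ hj)
    omega
  · intro m hm
    obtain ⟨⟨j, hjL, hjw, hje⟩, hlb⟩ := hs m hm
    refine ⟨⟨j, hjL, by omega, hje⟩, ?_⟩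
    intro j' hj'L hj'w
    have : j' ≠ w := fun hjw => habs (hjw ▸ hj'L)
    exact hlb j' hj'L (by omega)

theorem pvInv_step_present (L : List Int) (w : Int) (best : Option Int)
    (h : pvInv L (w + 1) best) (hmem : w ∈ L) :
    pvInv L w (if best.isNone || pvG L w + w < best.getD 0 then some (pvG L w + w) else best) := by
  obtain ⟨hn, hs⟩ := h
  cases best with
  | none =>
    simp only [Option.isNone_none, Bool.true_or, if_pos]
    refine ⟨fun he => absurd he (by simp), ?_⟩
    intro m hm
    rw [Option.some_inj] at hm
    subst hm
    have hall := hn rfl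
    refine ⟨⟨w, hmem, le_refl _, rfl⟩, ?_⟩
    intro j hjL hjw
    have := hall j hjL
    have hjwe : j = w := by omega
    subst hjwe
    exact le_refl _
  | some m0 =>
    simp only [Option.isNone_some, Bool.false_or, Option.getD_some]
    obtain ⟨⟨j0, hj0L, hj0w, hj0e⟩, hlb⟩ := hs m0 rfl
    by_cases hlt : pvG L w + w < m0
    · rw [if_pos (by simpa using hlt)]
      refine ⟨fun he => absurd he (by simp), ?_⟩
      intro m hm
      rw [Option.some_inj] at hm
      subst hm
      refine ⟨⟨w, hmem, le_refl _, rfl⟩, ?_⟩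
      intro j hjL hjw
      rcases eq_or_lt_of_le hjw with heq | hgt
      · subst heq; exact le_refl _
      · exact le_trans (le_of_lt hlt) (hlb j hjL (by omega))
    · rw [if_neg (by simpa using hlt)]
      refine ⟨fun he => by simp at he, ?_⟩
      intro m hm
      rw [Option.some_inj] at hm
      subst hm
      refine ⟨⟨j0, hj0L, by omega, hj0e⟩, ?_⟩
      intro j hjL hjw
      rcases eq_or_lt_of_le hjw with heq | hgt
      · subst heq; omega
      · exact hlb j hjL (by omega)

theorem pvSweep (L cnt : List Int) (n : Nat)
    (hc : ∀ j : Nat, j < n → PySem.List.pyGetD cnt (j : Int) 0 = (L.countP (fun t => t = (j : Int)) : Int)) :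
    ∀ (v : Nat) (best : Option Int), v ≤ n → pvInv L (v : Int) best →
    pvInv L 0
      (((PySem.List.pyRange ((v : Int) - 1) (-1) (-1)).foldl
        (fun (bi : Option Int × Int) w =>
          if PySem.List.pyGetD cnt w 0 ≠ 0 then
            ((if bi.1.isNone || bi.2 + w < bi.1.getD 0 then some (bi.2 + w) else bi.1),
             bi.2 + PySem.List.pyGetD cnt w 0)
          else bi)
        (best, pvG L ((v : Int) - 1))).1) := by
  intro v
  induction v with
  | zero =>
    intro best _ hinv
    rw [PySem.List.pyRange_neg_one_eq_nil (by norm_num)]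
    simpa using hinv
  | succ v ih =>
    intro best hvn hinv
    rw [show ((v + 1 : Nat) : Int) - 1 = (v : Int) by push_cast; ring]
    rw [PySem.List.pyRange_neg_one_cons (by omega)]
    simp only [List.foldl_cons]
    rw [hc v (by omega)]
    have hstep := pvG_step L (v : Int)
    by_cases hf : (L.countP (fun t => t = (v : Int)) : Int) ≠ 0
    · rw [if_pos hf]
      have hmem : (v : Int) ∈ L := by
        have : 0 < L.countP (fun t => t = (v : Int)) := by omega
        rw [List.countP_pos_iff] at this
        obtain ⟨x, hx, hxe⟩ := this
        simp only [decide_eq_true_eq] at hxe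
        exact hxe ▸ hx
      have hinv' := pvInv_step_present L (v : Int) best (by
        rwa [show ((v : Int) + 1) = ((v + 1 : Nat) : Int) by push_cast; ring]) hmem
      have hres := ih _ (by omega) hinv'
      rw [show pvG L ((v : Int) - 1) = pvG L (v : Int) + ↑(L.countP (fun t => t = (v : Int))) from hstep] at hres
      exact hres
    · rw [if_neg hf]
      rw [not_ne_iff] at hf
      have habs : (v : Int) ∉ L := by
        intro hmem
        have : 0 < L.countP (fun t => t = (v : Int)) := by
          rw [List.countP_pos_iff]
          exact ⟨_, hmem, by simp⟩
        omega
      have hinv' := pvInv_step_absent L (v : Int) best (by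
        rwa [show ((v : Int) + 1) = ((v + 1 : Nat) : Int) by push_cast; ring]) habs
      have hres := ih _ (by omega) hinv'
      rw [show pvG L ((v : Int) - 1) = pvG L (v : Int) by rw [hstep]; omega] at hres
      exact hres

theorem pvSortedLe (y : List Int) (hs : y.Pairwise (fun p q => q ≤ p)) : ∀ (i : Nat)
    (w : Int), y[i]? = some w → y.countP (fun t => w < t) ≤ i := by
  induction y with
  | nil => intro i w hw; simp at hw
  | cons h tl ih =>
    rw [List.pairwise_cons] at hs
    obtain ⟨hall, htl⟩ := hs
    intro i w hw
    match i with
    | 0 =>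
      rw [List.getElem?_cons_zero, Option.some_inj] at hw
      subst hw
      have hz : (h :: tl).countP (fun t => decide (h < t)) = 0 := by
        rw [List.countP_eq_zero]
        intro t ht
        rcases List.mem_cons.mp ht with rfl | htl'
        · simp
        · simpa using not_lt_of_ge (hall t htl')
      exact le_of_eq hz
    | i + 1 =>
      rw [List.getElem?_cons_succ] at hw
      have h1 := ih htl i w hw
      rw [List.countP_cons]
      split_ifs <;> omega

theorem pvSortedFirst (y : List Int) (hs : y.Pairwise (fun p q => q ≤ p)) : ∀ (j : Int)
    (hj : j ∈ y),
    y.countP (fun t => j < t) < y.length ∧ y[y.countP (fun t => j < t)]? = some j := by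
  induction y with
  | nil => intro j hj; simp at hj
  | cons h tl ih =>
    rw [List.pairwise_cons] at hs
    obtain ⟨hall, htl⟩ := hs
    intro j hj
    by_cases hjh : j = h
    · have hz : (h :: tl).countP (fun t => decide (j < t)) = 0 := by
        rw [List.countP_eq_zero]
        intro t ht
        rcases List.mem_cons.mp ht with rfl | htl'
        · simp [hjh]
        · have := hall t htl'
          simp only [decide_eq_true_eq]
          omega
      rw [hz]
      exact ⟨by simp, by simp [hjh]⟩
    · have hjtl : j ∈ tl := by
        rcases List.mem_cons.mp hj with rfl | htl'
        · exact absurd rfl hjh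
        · exact htl'
      have hjlt : j < h := lt_of_le_of_ne (hall j hjtl) hjh
      obtain ⟨hlt, heq⟩ := ih htl j hjtl
      have hcnt : (h :: tl).countP (fun t => decide (j < t))
          = tl.countP (fun t => decide (j < t)) + 1 := by
        rw [List.countP_cons]
        simp [hjlt]
      rw [hcnt]
      refine ⟨by simpa using hlt, ?_⟩
      rw [List.getElem?_cons_succ]
      exact heq

theorem pvCore (L : List Int) (m t : Int) (y : List Int)
    (hy : y = PySem.List.sorted L (fun u => u) true)
    (hm1 : ∃ i : Nat, ∃ h : i < y.length, m = (i : Int) + y[i])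
    (hm2 : ∀ (i : Nat) (h : i < y.length), m ≤ (i : Int) + y[i])
    (ht1 : ∃ j ∈ L, t = pvG L j + j) (ht2 : ∀ j ∈ L, t ≤ pvG L j + j) : m = t := by
  have hperm : y.Perm L := hy ▸ PySem.List.sorted_perm L (fun u => u) true
  have hpair : y.Pairwise (fun p q => q ≤ p) := by
    have := PySem.List.sorted_pairwise_rev L (fun u => u)
    simpa [hy] using this
  have hcnt : ∀ v : Int, y.countP (fun u => v < u) = L.countP (fun u => v < u) :=
    fun v => hperm.countP_eq _
  apply le_antisymm
  · obtain ⟨j, hjL, hte⟩ := ht1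
    have hjy : j ∈ y := hperm.mem_iff.mpr hjL
    obtain ⟨hlt, heq⟩ := pvSortedFirst y hpair j hjy
    have heq' : y[y.countP (fun u => j < u)]'hlt = j := by
      have := List.getElem?_eq_getElem hlt
      rw [this] at heq
      exact Option.some_inj.mp heq
    have hm := hm2 (y.countP (fun u => j < u)) hlt
    rw [heq'] at hm
    rw [hte]
    unfold pvG
    rw [← hcnt j]
    exact hm
  · obtain ⟨i, hi, hme⟩ := hm1
    have hjy : y[i] ∈ y := List.getElem_mem hi
    have hjL : y[i] ∈ L := hperm.mem_iff.mp hjy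
    have h1 := ht2 y[i] hjL
    have h2 := pvSortedLe y hpair i y[i] (List.getElem?_eq_getElem hi)
    unfold pvG at h1
    rw [← hcnt y[i]] at h1
    rw [hme]
    omega

theorem pvL_bounds (k a b c d : Int) (n : Nat) (hk : k = (n : Int)) (h1 : 1 ≤ n) :
    ∀ j ∈ (List.range n).map (fun i => PySem.Int.mod (pvGen a b c d i) k), 0 ≤ j ∧ j < (n : Int) := by
  intro j hj
  rw [List.mem_map] at hj
  obtain ⟨i, _, rfl⟩ := hj
  have hkpos : (0:Int) < k := by omega
  have := PySem.Int.mod_nonneg (pvGen a b c d i) hkpos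
  have := PySem.Int.mod_lt (pvGen a b c d i) hkpos
  omega

-- ===== VERDICT (by name: the statement is the Claim_ definition above) =====
theorem minPacks_spec : Claim_equal_minPacks := by
  intro k a b c d hdom hpre
  unfold Spec_minPacks
  obtain ⟨hk1, -⟩ := hpre
  set n := k.toNat with hndef
  have hk : k = (n : Int) := by omega
  have hn1 : 1 ≤ n := by omega
  set L : List Int := (List.range n).map (fun i => PySem.Int.mod (pvGen a b c d i) k) with hLdef
  have hLb := pvL_bounds k a b c d n hk hn1
  have hLlen : L.length = n := by simp [hLdef]
  have hLne : L ≠ [] := by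
    intro h
    rw [h] at hLlen
    simp at hLlen
    omega
  set y : List Int := PySem.List.sorted L (fun t => t) true with hydef
  have hylen : y.length = n := by
    rw [hydef, PySem.List.length_sorted, hLlen]
  -- ===== A side =====
  have hA1 := pvA1 a b c d (n - 1)
  rw [show (n - 1) + 1 = n by omega] at hA1
  have hA2 := pvA2 k ((List.range n).map (pvGen a b c d)) [] 0
  simp only [List.length_nil, Nat.cast_zero, List.nil_append, zero_add, List.length_map,
    List.length_range] at hA2
  rw [List.map_map, List.map_map] at hA2
  have hA2' : (PySem.List.pyRange 0 k 1).foldl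
      (fun (sx : Int × List Int) i =>
        (sx.1 + PySem.Int.floordiv (PySem.List.pyGetD sx.2 i 0) k,
         PySem.List.pySetD sx.2 i (PySem.Int.mod (PySem.List.pyGetD sx.2 i 0) k)))
      (0, (List.range n).map (pvGen a b c d))
      = (((List.range n).map ((fun t => PySem.Int.floordiv t k) ∘ pvGen a b c d)).sum,
         (List.range n).map ((fun t => PySem.Int.mod t k) ∘ pvGen a b c d)) := by
    rw [hk] at hA2 ⊢
    exact hA2
  show minPacks k a b c d = minPacks_alt k a b c d
  rw [minPacks, minPacks_alt]
  simp only [List.nil_append]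
  rw [show k - 1 = ((n - 1 : Nat) : Int) by omega, hA1, hA2']
  -- ===== B side =====
  have hB1 := pvB1 k a b c d n hk hn1 n hn1 (le_refl n)
  rw [← hk] at hB1
  rw [hB1]
  simp only [Function.comp_def]
  have hgz : pvG L ((n : Int) - 1) = 0 := by
    unfold pvG
    rw [List.countP_eq_zero.mpr]
    · simp
    · intro j hj
      have := hLb j hj
      simp only [decide_eq_true_eq]
      omega
  have hinv0 : pvInv L ((n : Int)) none := by
    constructor
    · intro _ j hj
      exact (hLb j hj).2
    · intro m hm
      simp at hm
  have hsw := pvSweep L (pvCounts L n) n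
    (fun j hj => pvCounts_get L n (j : Int) (by positivity) (by exact_mod_cast hj))
    n none (le_refl n) hinv0
  rw [hgz] at hsw
  rw [show ((n : Int)) - 1 = ((n - 1 : Nat) : Int) by omega] at hsw
  obtain ⟨t, ht⟩ : ∃ t, ((PySem.List.pyRange ((n - 1 : Nat) : Int) (-1) (-1)).foldl
      (fun (bi : Option Int × Int) w =>
        if PySem.List.pyGetD (pvCounts L n) w 0 ≠ 0 then
          ((if bi.1.isNone || bi.2 + w < bi.1.getD 0 then some (bi.2 + w) else bi.1),
           bi.2 + PySem.List.pyGetD (pvCounts L n) w 0)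
        else bi)
      (none, 0)).1 = some t := by
    cases hres : ((PySem.List.pyRange ((n - 1 : Nat) : Int) (-1) (-1)).foldl
      (fun (bi : Option Int × Int) w =>
        if PySem.List.pyGetD (pvCounts L n) w 0 ≠ 0 then
          ((if bi.1.isNone || bi.2 + w < bi.1.getD 0 then some (bi.2 + w) else bi.1),
           bi.2 + PySem.List.pyGetD (pvCounts L n) w 0)
        else bi)
      (none, 0)).1 with
    | none =>
      rw [hres] at hsw
      obtain ⟨j0, hj0⟩ := List.exists_mem_of_ne_nil L hLne
      have := hsw.1 rfl j0 hj0
      have := (hLb j0 hj0).1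
      omega
    | some t => exact ⟨t, rfl⟩
  rw [ht] at hsw
  obtain ⟨⟨j1, hj1L, hj1ge, hj1e⟩, htlb⟩ := hsw.2 t rfl
  rw [← hLdef, ← hydef, ht, Option.getD_some]
  rw [PySem.List.pyRange_one, show (k - 0).toNat = n by omega, List.map_map]
  simp only [Function.comp_def, zero_add]
  have hgety : ∀ q : Nat, q < n → ∀ hq : q < y.length,
      PySem.List.pyGetD y (q : Int) 0 = y[q]'hq := by
    intro q hq hq'
    rw [PySem.List.pyGetD_natCast]
    exact List.getD_eq_getElem y 0 hq'
  obtain ⟨m, hm⟩ : ∃ m, PySem.List.min?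
      ((List.range n).map (fun (q : Nat) => (q : Int) + PySem.List.pyGetD y (q : Int) 0))
      (fun t => t) = some m := by
    cases hc2 : PySem.List.min?
      ((List.range n).map (fun (q : Nat) => (q : Int) + PySem.List.pyGetD y (q : Int) 0))
      (fun t => t) with
    | none =>
      rw [PySem.List.min?_eq_none_iff] at hc2
      simp only [List.map_eq_nil_iff, List.range_eq_nil] at hc2
      omega
    | some m => exact ⟨m, rfl⟩
  rw [hm, Option.getD_some]
  have hmmem := PySem.List.min?_mem hm
  rw [List.mem_map] at hmmem
  obtain ⟨q, hq, hqe⟩ := hmmem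
  rw [List.mem_range] at hq
  have hm1 : ∃ i : Nat, ∃ h : i < y.length, m = (i : Int) + y[i] := by
    have hq' : q < y.length := by rw [hylen]; exact hq
    refine ⟨q, hq', ?_⟩
    rw [← hqe, hgety q hq hq']
  have hmin := PySem.List.min?_isMin hm
  have hm2 : ∀ (i : Nat) (h : i < y.length), m ≤ (i : Int) + y[i] := by
    intro i hi
    have hiN : i < n := by rw [hylen] at hi; exact hi
    have hmem := List.mem_map_of_mem (f := fun (q : Nat) => (q : Int) + PySem.List.pyGetD y (q : Int) 0)
      (List.mem_range.mpr hiN)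
    have hle := hmin _ hmem
    beta_reduce at hle
    rw [hgety i hiN hi] at hle
    exact hle
  have ht1 : ∃ j ∈ L, t = pvG L j + j := ⟨j1, hj1L, hj1e⟩
  have ht2 : ∀ j ∈ L, t ≤ pvG L j + j := fun j hj => htlb j hj (hLb j hj).1
  rw [pvCore L m t y hydef hm1 hm2 ht1 ht2]
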